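-- pv_equiv track=rewrite | github.com/daniel-reich/ubiquitous-fiesta | bupEio82q8NMnovZx_13.py | track_robot
-- ===== SOURCE A (Python) =====
-- def track_robot(instructions):
--     x = 0
--     y = 0
--     result = [0,0]
--     for i in range(len(instructions)):
--         if instructions[i].split()[0] == 'right':
--             x=x+int(instructions[i].split()[1])
--         elif instructions[i].split()[0] == 'left':
--             x=x-int(instructions[i].split()[1])
--         elif instructions[i].split()[0] == 'up':
--             y=y+int(instructions[i].split()[1])
--         elif instructions[i].split()[0] == 'down':
--             y=y-int(instructions[i].split()[1])
--     return [x,y]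
-- ===== SOURCE B (Python) =====
-- _DIRS = ('right', 'left', 'up', 'down')
--
-- def track_robot(instructions):
--     # stage 1: tokenize every instruction into (word, amount); amount is parsed
--     # only for the four known direction words, otherwise 0
--     moves = []
--     for ins in instructions:
--         parts = ins.split()
--         w = parts[0]
--         moves.append((w, int(parts[1]) if w in _DIRS else 0))
--     # stage 2: four per-direction reductions combined into coordinates
--     x = sum(a for w, a in moves if w == 'right') - sum(a for w, a in moves if w == 'left')
--     y = sum(a for w, a in moves if w == 'up') - sum(a for w, a in moves if w == 'down')
--     return [x, y]
-- ===== Notes on version B (the rewrite author's own statement) =====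
-- stated objective: alternative
-- what changed: Replaces A's single stateful pass with an if/elif cascade mutating x,y by a map-reduce decomposition: first tokenize all instructions into (word, amount) pairs, then compute each coordinate as a difference of per-direction sums over that token list.
import Mathlib
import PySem

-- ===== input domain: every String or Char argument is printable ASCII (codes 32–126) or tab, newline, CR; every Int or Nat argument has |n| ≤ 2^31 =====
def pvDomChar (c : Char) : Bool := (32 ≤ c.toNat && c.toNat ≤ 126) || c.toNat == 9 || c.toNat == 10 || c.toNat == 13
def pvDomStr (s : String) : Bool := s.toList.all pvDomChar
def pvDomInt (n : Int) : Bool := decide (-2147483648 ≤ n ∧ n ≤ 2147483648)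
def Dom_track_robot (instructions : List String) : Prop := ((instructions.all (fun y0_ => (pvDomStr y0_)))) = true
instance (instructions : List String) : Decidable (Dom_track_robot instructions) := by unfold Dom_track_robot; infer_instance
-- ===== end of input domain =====

-- B replaces A's single stateful if/elif pass with a map-reduce decomposition:
-- tokenize all instructions into (word, amount) pairs, then build each coordinate
-- as a difference of per-direction sums (alternative decomposition; same cost).

-- ===== PORT A =====
-- one loop iteration of A: split, test parts[0] against the four words, update (x, y)
def trackA_step (st : Int × Int) (s : String) : Int × Int :=
  let parts := PySem.Str.split₀ s
  match PySem.List.pyGet? parts 0 with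
  | none => st  -- Python raises IndexError here; excluded by Pre_
  | some w =>
    if w == "right" then
      match (PySem.List.pyGet? parts 1).bind PySem.Int.ofStr? with
      | some n => (st.1 + n, st.2)
      | none => st  -- Python raises; excluded by Pre_
    else if w == "left" then
      match (PySem.List.pyGet? parts 1).bind PySem.Int.ofStr? with
      | some n => (st.1 - n, st.2)
      | none => st
    else if w == "up" then
      match (PySem.List.pyGet? parts 1).bind PySem.Int.ofStr? with
      | some n => (st.1, st.2 + n)
      | none => st
    else if w == "down" then
      match (PySem.List.pyGet? parts 1).bind PySem.Int.ofStr? with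
      | some n => (st.1, st.2 - n)
      | none => st
    else st

def track_robot (instructions : List String) : List Int :=
  let st := instructions.foldl trackA_step (0, 0)
  [st.1, st.2]

-- ===== PORT B =====
-- stage 1: tokenize one instruction into (word, amount)
def trackB_move (s : String) : String × Int :=
  let parts := PySem.Str.split₀ s
  match PySem.List.pyGet? parts 0 with
  | none => ("", 0)  -- Python raises IndexError here; excluded by Pre_
  | some w =>
    if w ∈ ["right", "left", "up", "down"] then
      match (PySem.List.pyGet? parts 1).bind PySem.Int.ofStr? with
      | some n => (w, n)
      | none => (w, 0)  -- Python raises; excluded by Pre_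
    else (w, 0)

-- stage 2: sum(a for w, a in moves if w == d)
def trackB_dirSum (moves : List (String × Int)) (d : String) : Int :=
  ((moves.filter (fun m => m.1 == d)).map Prod.snd).sum

def track_robot_alt (instructions : List String) : List Int :=
  let moves := instructions.map trackB_move
  [trackB_dirSum moves "right" - trackB_dirSum moves "left",
   trackB_dirSum moves "up" - trackB_dirSum moves "down"]

-- ===== PRECONDITION & SPEC =====
-- Pre_ excludes exactly the inputs on which A raises: an instruction whose split() is empty
-- (IndexError on parts[0]) or a direction word followed by no/non-integer amount (IndexError/ValueError).
def Pre_track_robot (instructions : List String) : Prop :=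
  ∀ s ∈ instructions,
    PySem.Str.split₀ s ≠ [] ∧
    ((PySem.Str.split₀ s).head? ∈ ([some "right", some "left", some "up", some "down"] : List (Option String)) →
      ((PySem.List.pyGet? (PySem.Str.split₀ s) 1).bind PySem.Int.ofStr?) ≠ none)
instance (instructions : List String) : Decidable (Pre_track_robot instructions) := by
  unfold Pre_track_robot; infer_instance
def pvWitness_track_robot : List String := ["right 3", "up 2", "noop", "left 1"]
def Spec_track_robot (instructions : List String) (out : List Int) : Prop := out = track_robot_alt instructions
instance (instructions : List String) (out : List Int) : Decidable (Spec_track_robot instructions out) := by unfold Spec_track_robot; infer_instance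

-- ===== CLAIM (what is proved, stated in full; the proofs are below) =====
def Claim_equal_track_robot : Prop := ∀ (instructions : List String), Dom_track_robot instructions → Pre_track_robot instructions → Spec_track_robot instructions (track_robot instructions)

-- ===== LEMMAS AND PROOFS =====
-- the head token's contribution to direction d's sum
def trackContrib (s : String) (d : String) : Int :=
  if (trackB_move s).1 = d then (trackB_move s).2 else 0

-- B's per-direction sum over a cons of the token list
theorem dirSum_cons (m : String × Int) (l : List (String × Int)) (d : String) :
    trackB_dirSum (m :: l) d = (if m.1 = d then m.2 else 0) + trackB_dirSum l d := by
  by_cases h : m.1 = d <;> simp [trackB_dirSum, h]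

-- one A step equals the state shifted by the head token's four contributions
theorem step_eq (st : Int × Int) (s : String) :
    trackA_step st s =
      (st.1 + trackContrib s "right" - trackContrib s "left",
       st.2 + trackContrib s "up" - trackContrib s "down") := by
  unfold trackA_step trackContrib trackB_move
  cases h0 : PySem.List.pyGet? (PySem.Str.split₀ s) 0 with
  | none => simp [h0]
  | some w =>
    simp only [h0]
    by_cases h1 : w = "right"
    · subst h1
      cases hv : (PySem.List.pyGet? (PySem.Str.split₀ s) 1).bind PySem.Int.ofStr? <;> simp
    · by_cases h2 : w = "left"
      · subst h2
        cases hv : (PySem.List.pyGet? (PySem.Str.split₀ s) 1).bind PySem.Int.ofStr? <;>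
          simp [sub_eq_add_neg]
      · by_cases h3 : w = "up"
        · subst h3
          cases hv : (PySem.List.pyGet? (PySem.Str.split₀ s) 1).bind PySem.Int.ofStr? <;> simp
        · by_cases h4 : w = "down"
          · subst h4
            cases hv : (PySem.List.pyGet? (PySem.Str.split₀ s) 1).bind PySem.Int.ofStr? <;>
              simp [sub_eq_add_neg]
          · simp [h1, h2, h3, h4]

-- loop invariant: A's fold from any state equals that state shifted by B's four direction sums
theorem track_invariant (l : List String) : ∀ st : Int × Int,
    l.foldl trackA_step st =
      (st.1 + trackB_dirSum (l.map trackB_move) "right" - trackB_dirSum (l.map trackB_move) "left",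
       st.2 + trackB_dirSum (l.map trackB_move) "up" - trackB_dirSum (l.map trackB_move) "down") := by
  induction l with
  | nil => intro st; simp [trackB_dirSum]
  | cons a l ih =>
    intro st
    rw [List.foldl_cons, ih, List.map_cons, dirSum_cons, dirSum_cons, dirSum_cons, dirSum_cons,
        step_eq]
    show ((_ : Int × Int).1 + _ - _, _) = _
    simp only [trackContrib]
    apply Prod.ext <;> simp <;> ring

-- ===== VERDICT (by name: the statement is the Claim_ definition above) =====
theorem track_robot_spec : Claim_equal_track_robot := by
  intro instructions _ _
  unfold Spec_track_robot track_robot track_robot_alt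
  rw [track_invariant]
  simp
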